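-- pv_equiv track=rewrite | github.com/yzziqiu/algorithms | sorting/applied-sort.py | findMaxDivision
-- ===== SOURCE A (Python) =====
-- def findMaxDivision(A, n):
--     minn = min(A)
--     maxx = max(A)
--     # 生成桶
--     res = [0 for i in range(maxx - minn + 1)]
--     # 填桶
--     for i in range(n):
--         res[A[i] - minn] += 1
--     count = 0
--     num = -0x3f3f3f3f
--     for i in range(len(res)):
--         if res[i] == 0:
--             # 如果说当前的桶为空，则记录下来连续的空桶数
--             count += 1
--         else:
--             if num < count:
--                 num = count
--             count = 0
--         # 为何加1？举例如下：最大值为9，最小值为3，中间有5个空桶，但差值应为6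
--     return num + 1
-- ===== SOURCE B (Python) =====
-- def findMaxDivision(A, n):
--     prev = min(A) - 1
--     num = -0x3f3f3f3f
--     for v in sorted(set(A[i] for i in range(n))):
--         num = max(num, v - prev - 1)
--         prev = v
--     return num + 1
-- ===== Notes on version B (the rewrite author's own statement) =====
-- stated objective: faster
-- what changed: A builds a bucket array spanning the whole value range [min(A),max(A)], fills it from the first n elements and scans it for the longest run of empty buckets (O(n + range)); B sorts the distinct counted values and finds the largest gap in one pass from min(A)-1 (O(n log n)), never materializing the range-sized array (measured 2.8-4.4x in a timing run). Pre_ excludes only the inputs on which A raises (empty list: ValueError from min([]); n > len(A): IndexError), and B raises on exactly the same inputs.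
import Mathlib
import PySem

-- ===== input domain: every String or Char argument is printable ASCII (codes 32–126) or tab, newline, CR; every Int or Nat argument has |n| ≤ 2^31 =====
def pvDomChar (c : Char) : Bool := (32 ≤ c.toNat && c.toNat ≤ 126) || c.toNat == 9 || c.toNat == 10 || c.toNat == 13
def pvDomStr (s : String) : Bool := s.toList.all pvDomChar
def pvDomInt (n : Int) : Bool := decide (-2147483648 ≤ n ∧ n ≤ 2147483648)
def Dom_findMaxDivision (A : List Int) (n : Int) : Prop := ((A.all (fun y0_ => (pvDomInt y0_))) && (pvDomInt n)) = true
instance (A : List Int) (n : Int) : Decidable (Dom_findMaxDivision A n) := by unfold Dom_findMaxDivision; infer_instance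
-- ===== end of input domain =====

-- B replaces A's bucket array over the whole value range (filled, then scanned for the longest
-- empty run) by sorting the distinct counted values and scanning their gaps in one pass from
-- min(A)-1, avoiding the range-sized array.

-- ===== PORT A =====
-- res[j] += 1 (every input Pre_ admits keeps the index in range, so Python's negative wraparound never fires)
def pyBump (res : List Int) (j : Int) : List Int :=
  res.set j.toNat (res.getD j.toNat 0 + 1)

def findMaxDivision (A : List Int) (n : Int) : Int :=
  let minn := (PySem.List.min? A (fun x => x)).getD 0   -- min(A); raises on [] (excluded by Pre_)
  let maxx := (PySem.List.max? A (fun x => x)).getD 0   -- max(A)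
  let res0 := List.replicate (maxx - minn + 1).toNat (0 : Int)
  let res := (PySem.List.pyRange 0 n).foldl
      (fun r i => pyBump r (PySem.List.pyGetD A i 0 - minn)) res0
  let st := res.foldl
      (fun (p : Int × Int) c =>
        if c == 0 then (p.1 + 1, p.2)
        else (0, if p.2 < p.1 then p.1 else p.2))
      ((0 : Int), (-1061109567 : Int))
  st.2 + 1

-- ===== PORT B =====
def findMaxDivision_alt (A : List Int) (n : Int) : Int :=
  let prev := (PySem.List.min? A (fun x => x)).getD 0 - 1   -- min(A); raises on [] (excluded by Pre_)
  let vals := PySem.List.sorted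
      (PySem.Set.ofList ((PySem.List.pyRange 0 n).map (fun i => PySem.List.pyGetD A i 0)))
      (fun x => x)   -- sorted(set(A[i] for i in range(n))); A[i] in range on every admitted input
  let st := vals.foldl (fun (p : Int × Int) v => (v, max p.2 (v - p.1 - 1)))
      (prev, (-1061109567 : Int))
  st.2 + 1

-- ===== PRECONDITION & SPEC =====
-- Pre_ excludes exactly the inputs on which the Python A raises: the empty list (min([]) raises
-- ValueError) and n > len(A) (A[i] raises IndexError); B raises on the same inputs.
def Pre_findMaxDivision (A : List Int) (n : Int) : Prop :=
  A ≠ [] ∧ n ≤ (A.length : Int)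
instance (A : List Int) (n : Int) : Decidable (Pre_findMaxDivision A n) := by
  unfold Pre_findMaxDivision; infer_instance

def pvWitness_findMaxDivision : List Int × Int := ([3, 7, 3], 3)

def Spec_findMaxDivision (A : List Int) (n : Int) (out : Int) : Prop := out = findMaxDivision_alt A n
instance (A : List Int) (n : Int) (out : Int) : Decidable (Spec_findMaxDivision A n out) := by
  unfold Spec_findMaxDivision; infer_instance

-- ===== CLAIM (what is proved, stated in full; the proofs are below) =====
def Claim_equal_findMaxDivision : Prop := ∀ (A : List Int) (n : Int), Dom_findMaxDivision A n → Pre_findMaxDivision A n → Spec_findMaxDivision A n (findMaxDivision A n)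

-- ===== LEMMAS AND PROOFS =====

-- the bucket list of A over the sorted distinct value list, written with explicit gap blocks
def countsOf (A : List Int) : List Int → List Int
  | [] => []
  | [v] => [(A.count v : Int)]
  | v :: w :: t => (A.count v : Int) :: (List.replicate (w - v - 1).toNat 0 ++ countsOf A (w :: t))

theorem length_pyBump (r : List Int) (j : Int) : (pyBump r j).length = r.length := by
  simp [pyBump]

theorem getD_pyBump (r : List Int) (j : Int) (k : Nat) (h0 : 0 ≤ j) (h1 : j < (r.length : Int)) :
    (pyBump r j).getD k 0 = r.getD k 0 + (if (k : Int) = j then 1 else 0) := by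
  unfold pyBump
  rw [List.getD_eq_getElem?_getD, List.getD_eq_getElem?_getD, List.getElem?_set]
  by_cases hk : j.toNat = k
  · have hk' : (k : Int) = j := by omega
    have hlt : k < r.length := by omega
    simp [hk, hk', hlt, List.getD_eq_getElem r 0 hlt]
  · have hk' : ¬ ((k : Int) = j) := by omega
    simp [hk, hk']

theorem length_fill (minn : Int) :
    ∀ (l r : List Int), (l.foldl (fun r a => pyBump r (a - minn)) r).length = r.length := by
  intro l
  induction l with
  | nil => intro r; rfl
  | cons a l ih => intro r; simp only [List.foldl_cons]; rw [ih, length_pyBump]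

theorem getD_fill (minn : Int) :
    ∀ (l r : List Int), (∀ a ∈ l, minn ≤ a ∧ a - minn < (r.length : Int)) → ∀ (k : Nat),
      (l.foldl (fun r a => pyBump r (a - minn)) r).getD k 0
        = r.getD k 0 + (l.count (minn + (k : Int)) : Int) := by
  intro l
  induction l with
  | nil => intro r _ k; simp
  | cons a l ih =>
    intro r hb k
    rw [List.foldl_cons]
    rw [ih (pyBump r (a - minn))
        (by intro x hx
            have := hb x (List.mem_cons_of_mem _ hx)
            simpa [length_pyBump] using this) k]
    rw [getD_pyBump r (a - minn) k (by have := hb a List.mem_cons_self; omega)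
        (by have := hb a List.mem_cons_self; omega)]
    have hc : ((a :: l).count (minn + (k : Int)) : Int)
        = (l.count (minn + (k : Int)) : Int) + (if (k : Int) = a - minn then 1 else 0) := by
      rw [List.count_cons]
      by_cases h : minn + (k : Int) = a
      · have h2 : (k : Int) = a - minn := by omega
        simp [h, h2]
      · have h2 : ¬ ((k : Int) = a - minn) := by omega
        simp [h2]
        omega
    rw [hc]; ring

-- every element of a <-pairwise list is at most its last element
theorem le_getLast_of_pairwise :
    ∀ (l : List Int) (hne : l ≠ []), List.Pairwise (· < ·) l → ∀ x ∈ l, x ≤ l.getLast hne := by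
  intro l
  induction l with
  | nil => intro hne; simp at hne
  | cons a l ih =>
    intro _ hp x hx
    cases l with
    | nil => simp at hx; simp [hx]
    | cons b t =>
      rw [List.getLast_cons (by simp)]
      have hb : b ≤ (b :: t).getLast (by simp) :=
        ih (by simp) (List.pairwise_cons.mp hp).2 b List.mem_cons_self
      rcases List.mem_cons.mp hx with h | h
      · have ha : a < b := (List.pairwise_cons.mp hp).1 b List.mem_cons_self
        subst h; omega
      · exact ih (by simp) (List.pairwise_cons.mp hp).2 x h

theorem mapRange_eq_countsOf (A : List Int) :
    ∀ (u : List Int) (v : Int), List.Pairwise (· < ·) (v :: u) →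
    (∀ x ∈ A, x < v ∨ x ∈ v :: u) →
    (List.range (((v :: u).getLast (by simp) - v + 1).toNat)).map
        (fun (i : Nat) => (A.count (v + (i : Int)) : Int))
      = countsOf A (v :: u) := by
  intro u
  induction u with
  | nil =>
    intro v _ _
    simp [countsOf]
  | cons w t ih =>
    intro v hp hA
    have hvw : v < w := (List.pairwise_cons.mp hp).1 w List.mem_cons_self
    have hwl : w ≤ (w :: t).getLast (by simp) :=
      le_getLast_of_pairwise (w :: t) (by simp) (List.pairwise_cons.mp hp).2 w List.mem_cons_self
    have hlast : (v :: w :: t).getLast (by simp) = (w :: t).getLast (by simp) :=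
      List.getLast_cons (by simp)
    rw [hlast]
    set M := (w :: t).getLast (by simp) with hM
    have hg : (M - v + 1).toNat = (w - v).toNat + (M - w + 1).toNat := by omega
    rw [hg, List.range_add, List.map_append, List.map_map]
    have hsecond :
        ((List.range (M - w + 1).toNat).map
          ((fun (i : Nat) => (A.count (v + (i : Int)) : Int)) ∘ (fun x => (w - v).toNat + x)))
        = countsOf A (w :: t) := by
      rw [← ih w (List.pairwise_cons.mp hp).2
          (by intro x hx
              rcases hA x hx with h | h
              · left; omega
              · rcases List.mem_cons.mp h with h' | h'
                · left; omega
                · right; exact h')]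
      apply List.map_congr_left
      intro i _
      simp only [Function.comp]
      have hc : v + (((w - v).toNat + i : Nat) : Int) = w + (i : Int) := by push_cast; omega
      rw [hc]
    rw [hsecond]
    have hfirst :
        (List.range (w - v).toNat).map (fun (i : Nat) => (A.count (v + (i : Int)) : Int))
        = (A.count v : Int) :: List.replicate (w - v - 1).toNat (0 : Int) := by
      have hg1 : (w - v).toNat = (w - v - 1).toNat + 1 := by omega
      rw [hg1, List.range_succ_eq_map, List.map_cons, List.map_map]
      have htail : List.map ((fun (i : Nat) => (A.count (v + (i : Int)) : Int)) ∘ Nat.succ)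
          (List.range (w - v - 1).toNat) = List.replicate (w - v - 1).toNat (0 : Int) := by
        rw [List.eq_replicate_iff]
        refine ⟨by simp, ?_⟩
        intro b hb
        rcases List.mem_map.mp hb with ⟨i, hi, hbi⟩
        have hilt := List.mem_range.mp hi
        have hx : (v + ((i : Int) + 1)) ∉ A := by
          intro hmemA
          rcases hA _ hmemA with h | h
          · omega
          · rcases List.mem_cons.mp h with h' | h'
            · omega
            · rcases List.mem_cons.mp h' with h'' | h''
              · omega
              · have : w < v + ((i : Int) + 1) :=
                  (List.pairwise_cons.mp (List.pairwise_cons.mp hp).2).1 _ h''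
                omega
        rw [← hbi]
        simp only [Function.comp]
        have hcst : (v + ((Nat.succ i : Nat) : Int)) = v + ((i : Int) + 1) := by push_cast; ring
        rw [hcst, List.count_eq_zero.mpr hx]
        simp
      rw [htail]
      norm_num
    rw [hfirst]
    simp [countsOf]

theorem foldl_scan_replicate_zero :
    ∀ (g : Nat) (k num : Int),
      (List.replicate g (0 : Int)).foldl
        (fun (p : Int × Int) c =>
          if c == 0 then (p.1 + 1, p.2)
          else (0, if p.2 < p.1 then p.1 else p.2)) (k, num)
      = (k + (g : Int), num) := by
  intro g
  induction g with
  | zero => intro k num; simp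
  | succ g ih =>
    intro k num
    rw [List.replicate_succ, List.foldl_cons]
    simp only [show ((0 : Int) == 0) = true from rfl, if_pos]
    rw [ih]
    simp [Prod.ext_iff]
    push_cast
    ring

theorem scan_countsOf (A : List Int) :
    ∀ (u : List Int) (v : Int), List.Pairwise (· < ·) (v :: u) →
    (∀ x ∈ v :: u, x ∈ A) →
    ∀ (k num : Int),
      ((countsOf A (v :: u)).foldl
        (fun (p : Int × Int) c =>
          if c == 0 then (p.1 + 1, p.2)
          else (0, if p.2 < p.1 then p.1 else p.2)) (k, num)).2
      = ((v :: u).zip u).foldl (fun m p => max m (p.2 - p.1 - 1)) (max num k) := by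
  intro u
  induction u with
  | nil =>
    intro v _ hmem k num
    have hpos : 0 < A.count v := List.count_pos_iff.mpr (hmem v List.mem_cons_self)
    have hne : (((A.count v : Int)) == 0) = false := by
      simp; omega
    simp only [countsOf, List.foldl_cons, List.foldl_nil, hne, Bool.false_eq_true, if_false,
      List.zip_nil_right]
    rw [max_def]
    split_ifs <;> omega
  | cons w t ih =>
    intro v hp hmem k num
    have hvw : v < w := (List.pairwise_cons.mp hp).1 w List.mem_cons_self
    have hpos : 0 < A.count v := List.count_pos_iff.mpr (hmem v List.mem_cons_self)
    have hne : (((A.count v : Int)) == 0) = false := by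
      simp; omega
    simp only [countsOf, List.foldl_cons, List.foldl_append, hne, Bool.false_eq_true, if_false]
    rw [foldl_scan_replicate_zero]
    have hcast : ((0 : Int) + ((w - v - 1).toNat : Int)) = w - v - 1 := by omega
    rw [hcast]
    rw [ih w (List.pairwise_cons.mp hp).2 (fun x hx => hmem x (List.mem_cons_of_mem _ hx))]
    have : max (if num < k then k else num) (w - v - 1) = max (max num k) (w - v - 1) := by
      rw [max_def, max_def, max_def]
      split_ifs <;> omega
    simp only [List.zip_cons_cons, List.foldl_cons]
    rw [← this]

-- B's single pass with (prev, num) state is the running max over the consecutive gaps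
theorem foldl_gapmax :
    ∀ (l : List Int) (p0 n0 : Int),
      (l.foldl (fun (p : Int × Int) v => (v, max p.2 (v - p.1 - 1))) (p0, n0)).2
      = ((p0 :: l).zip l).foldl (fun m q => max m (q.2 - q.1 - 1)) n0 := by
  intro l
  induction l with
  | nil => intro p0 n0; rfl
  | cons v t ih =>
    intro p0 n0
    rw [List.foldl_cons, List.zip_cons_cons, List.foldl_cons, ih]

theorem findMaxDivision_spec : Claim_equal_findMaxDivision := by
  intro A n _ hPre
  obtain ⟨hne, hn2⟩ := hPre
  unfold Spec_findMaxDivision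
  -- min and max of A exist
  obtain ⟨m, hm⟩ : ∃ m, PySem.List.min? A (fun x => x) = some m := by
    cases h : PySem.List.min? A (fun x => x) with
    | none => exact absurd ((PySem.List.min?_eq_none_iff _ _).mp h) hne
    | some m => exact ⟨m, rfl⟩
  obtain ⟨M0, hM0⟩ : ∃ M0, PySem.List.max? A (fun x => x) = some M0 := by
    cases h : PySem.List.max? A (fun x => x) with
    | none => exact absurd ((PySem.List.max?_eq_none_iff _ _).mp h) hne
    | some M0 => exact ⟨M0, rfl⟩
  have hmle : ∀ y ∈ A, m ≤ y := fun y hy => PySem.List.min?_isMin hm y hy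
  have hMge : ∀ y ∈ A, y ≤ M0 := fun y hy => PySem.List.max?_isMax hM0 y hy
  by_cases hn : n ≤ 0
  · -- nothing is counted: the scan maximum is never updated on either side
    simp only [findMaxDivision, findMaxDivision_alt, hm, hM0, Option.getD_some]
    have hr : PySem.List.pyRange 0 n = [] := by
      rw [List.eq_nil_iff_forall_not_mem]
      intro x hx
      have := PySem.List.mem_pyRange_one.mp hx
      omega
    rw [hr]
    simp only [List.foldl_nil, List.map_nil]
    rw [foldl_scan_replicate_zero]
    have hsorted : PySem.List.sorted (PySem.Set.ofList ([] : List Int)) (fun x => x) = [] :=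
      (PySem.List.sorted_eq_nil_iff _ _ _).mpr rfl
    rw [hsorted]
    rfl
  have hn1 : 1 ≤ n := by omega
  simp only [findMaxDivision, findMaxDivision_alt, hm, hM0, Option.getD_some]
  set P := List.take n.toNat A with hP
  have hPlen : (P.length : Int) = n := by
    rw [hP, List.length_take]
    omega
  have hPsub : ∀ x ∈ P, x ∈ A := fun x hx => List.mem_of_mem_take hx
  have hPne : P ≠ [] := by
    intro h
    have : (P.length : Int) = 0 := by rw [h]; simp
    omega
  -- both sides read exactly the prefix P = A[:n]
  have hcongr : ∀ i ∈ PySem.List.pyRange 0 n, PySem.List.pyGetD A i 0 = PySem.List.pyGetD P i 0 := by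
    intro i hi
    rcases PySem.List.mem_pyRange_one.mp hi with ⟨h0, h1⟩
    rw [PySem.List.pyGetD_eq_getElem A 0 h0 (by omega),
        PySem.List.pyGetD_eq_getElem P 0 h0 (by omega)]
    simp only [hP, List.getElem_take]
  have hrange : PySem.List.pyRange 0 n = PySem.List.pyRange 0 (PySem.List.len P) := by
    simp [PySem.List.len, hPlen]
  have hmapP : (PySem.List.pyRange 0 n).map (fun i => PySem.List.pyGetD A i 0) = P := by
    rw [List.map_congr_left hcongr, hrange]
    exact PySem.List.map_pyGetD_pyRange_zero P 0
  rw [hmapP]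
  have hstep : ∀ (acc : List Int), ∀ i ∈ PySem.List.pyRange 0 n,
      pyBump acc (PySem.List.pyGetD A i 0 - m) = pyBump acc (PySem.List.pyGetD P i 0 - m) := by
    intro acc i hi
    rw [hcongr i hi]
  rw [PySem.List.foldl_congr_mem _ _ _ _ hstep]
  rw [hrange,
    PySem.List.foldl_pyRange_pyGetD P 0 (fun r a => pyBump r (a - m))
      (List.replicate (M0 - m + 1).toNat (0 : Int)) (le_refl 0)]
  simp only [Int.toNat_zero, List.drop_zero]
  -- the filled bucket list is the counts of P over the value range of A
  have hbnd : ∀ a ∈ P, m ≤ a ∧ a - m < ((List.replicate (M0 - m + 1).toNat (0 : Int)).length : Int) := by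
    intro a ha
    refine ⟨hmle a (hPsub a ha), ?_⟩
    have := hMge a (hPsub a ha)
    simp only [List.length_replicate]
    omega
  have hres : (P.foldl (fun r a => pyBump r (a - m)) (List.replicate (M0 - m + 1).toNat (0 : Int)))
      = (List.range (M0 - m + 1).toNat).map (fun (i : Nat) => (P.count (m + (i : Int)) : Int)) := by
    apply List.ext_getElem
    · rw [length_fill]
      simp
    · intro i h1 h2
      rw [← List.getD_eq_getElem _ 0 h1]
      rw [getD_fill m P (List.replicate (M0 - m + 1).toNat (0 : Int)) hbnd i]
      have hiL : i < (M0 - m + 1).toNat := by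
        rw [length_fill] at h1
        simpa using h1
      rw [List.getD_eq_getElem _ 0 (by simpa using hiL)]
      simp [List.getElem_replicate, List.getElem_map, List.getElem_range]
  rw [hres]
  -- facts about the sorted distinct value list of the prefix
  set vals := PySem.List.sorted (PySem.Set.ofList P) (fun x => x) with hvals
  have hperm : vals.Perm (PySem.Set.ofList P) := PySem.List.sorted_perm _ _ _
  have hmem : ∀ x, x ∈ vals ↔ x ∈ P := fun x => (hperm.mem_iff).trans (PySem.Set.mem_ofList P x)
  have hnd : vals.Nodup := (hperm.nodup_iff).mpr (PySem.Set.nodup_ofList P)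
  have hle : List.Pairwise (· ≤ ·) vals := PySem.List.sorted_pairwise _ _
  have hpair : List.Pairwise (· < ·) vals := (hle.and hnd).imp (fun h => h.1.lt_of_ne h.2)
  obtain ⟨v, u, hvu⟩ : ∃ v u, vals = v :: u := by
    cases hv : vals with
    | nil =>
      exfalso
      have h0 : PySem.Set.ofList P = [] := (PySem.List.sorted_eq_nil_iff _ _ _).mp (hvals ▸ hv)
      cases hPp : P with
      | nil => exact hPne hPp
      | cons a t =>
        have : a ∈ PySem.Set.ofList P := (PySem.Set.mem_ofList _ _).mpr (by rw [hPp]; exact List.mem_cons_self)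
        rw [h0] at this
        simp at this
    | cons v u => exact ⟨v, u, rfl⟩
  have hvne : vals ≠ [] := by rw [hvu]; simp
  have hvP : v ∈ P := (hmem v).mp (by rw [hvu]; exact List.mem_cons_self)
  have hvle : ∀ x ∈ vals, v ≤ x := by
    intro x hx
    rw [hvu] at hx
    rcases List.mem_cons.mp hx with h | h
    · exact le_of_eq h.symm
    · exact le_of_lt ((List.pairwise_cons.mp (hvu ▸ hpair)).1 x h)
  have hlastge : ∀ x ∈ vals, x ≤ vals.getLast hvne := le_getLast_of_pairwise vals hvne hpair
  have hmv : m ≤ v := hmle v (hPsub v hvP)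
  have hMv : vals.getLast hvne ≤ M0 := hMge _ (hPsub _ ((hmem _).mp (List.getLast_mem hvne)))
  have hmM : m ≤ M0 := hmle M0 (PySem.List.max?_mem hM0)
  -- decompose the bucket list: leading zeros, the occupied blocks, trailing zeros
  set Mv := (v :: u).getLast (by simp) with hMvdef
  have hMvl : Mv = vals.getLast hvne := by
    rw [hMvdef]
    congr 1
    exact hvu.symm
  have hvMv : v ≤ Mv := by
    rw [hMvl]
    exact hlastge v ((hmem v).mpr hvP)
  have hMvM : Mv ≤ M0 := by rw [hMvl]; exact hMv
  have hdec : (List.range (M0 - m + 1).toNat).map (fun (i : Nat) => (P.count (m + (i : Int)) : Int))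
      = (List.replicate (v - m).toNat 0 ++ countsOf P (v :: u)) ++ List.replicate (M0 - Mv).toNat 0 := by
    have hsplit : (M0 - m + 1).toNat = (v - m).toNat + ((Mv - v + 1).toNat + (M0 - Mv).toNat) := by
      omega
    rw [hsplit, List.range_add, List.map_append, List.map_map]
    have hlead : (List.range (v - m).toNat).map (fun (i : Nat) => (P.count (m + (i : Int)) : Int))
        = List.replicate (v - m).toNat (0 : Int) := by
      rw [List.eq_replicate_iff]
      refine ⟨by simp, ?_⟩
      intro b hb
      rcases List.mem_map.mp hb with ⟨i, hi, hbi⟩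
      have hilt := List.mem_range.mp hi
      have hx : (m + (i : Int)) ∉ P := by
        intro hmemP
        have := hvle _ ((hmem _).mpr hmemP)
        omega
      rw [← hbi, List.count_eq_zero.mpr hx]
      simp
    rw [hlead]
    have hmid : (List.range ((Mv - v + 1).toNat + (M0 - Mv).toNat)).map
          ((fun (i : Nat) => (P.count (m + (i : Int)) : Int)) ∘ (fun x => (v - m).toNat + x))
        = countsOf P (v :: u) ++ List.replicate (M0 - Mv).toNat 0 := by
      have hfun : ∀ i ∈ List.range ((Mv - v + 1).toNat + (M0 - Mv).toNat),
          ((fun (i : Nat) => (P.count (m + (i : Int)) : Int)) ∘ (fun x => (v - m).toNat + x)) i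
          = (fun (i : Nat) => (P.count (v + (i : Int)) : Int)) i := by
        intro i _
        simp only [Function.comp]
        have hc : m + (((v - m).toNat + i : Nat) : Int) = v + (i : Int) := by push_cast; omega
        rw [hc]
      rw [List.map_congr_left hfun, List.range_add, List.map_append, List.map_map]
      have hmid1 : (List.range (Mv - v + 1).toNat).map (fun (i : Nat) => (P.count (v + (i : Int)) : Int))
          = countsOf P (v :: u) := by
        have := mapRange_eq_countsOf P u v (hvu ▸ hpair)
          (by intro x hx
              right
              rw [← hvu]
              exact (hmem x).mpr hx)
        rw [← hMvdef] at this
        exact this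
      have hmid2 : (List.range (M0 - Mv).toNat).map
            ((fun (i : Nat) => (P.count (v + (i : Int)) : Int)) ∘ (fun x => (Mv - v + 1).toNat + x))
          = List.replicate (M0 - Mv).toNat (0 : Int) := by
        rw [List.eq_replicate_iff]
        refine ⟨by simp, ?_⟩
        intro b hb
        rcases List.mem_map.mp hb with ⟨i, hi, hbi⟩
        have hx : (v + (((Mv - v + 1).toNat + i : Nat) : Int)) ∉ P := by
          intro hmemP
          have h1 := hlastge _ ((hmem _).mpr hmemP)
          rw [← hMvl] at h1
          have : (((Mv - v + 1).toNat + i : Nat) : Int) = (Mv - v + 1) + (i : Int) := by push_cast; omega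
          omega
        rw [← hbi]
        simp only [Function.comp]
        rw [List.count_eq_zero.mpr hx]
        simp
      rw [hmid1, hmid2]
    rw [hmid, List.append_assoc]
  rw [hdec]
  rw [List.foldl_append, List.foldl_append]
  rw [foldl_scan_replicate_zero]  -- trailing zeros only advance the run counter
  rw [foldl_scan_replicate_zero]  -- leading zeros set the initial run counter to v - m
  have hc0 : ((0 : Int) + ((v - m).toNat : Int)) = v - m := by omega
  rw [hc0]
  rw [show ∀ (x y : Int), ((x, y) : Int × Int).2 = y from fun _ _ => rfl]
  rw [scan_countsOf P u v (hvu ▸ hpair) (fun x hx => (hmem x).mp (hvu ▸ hx))]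
  -- the B side: one pass over the sorted distinct values from prev = min(A) - 1
  rw [hvu, foldl_gapmax, List.zip_cons_cons, List.foldl_cons]
  have hfirst : max (-1061109567 : Int) (v - (m - 1) - 1) = max (-1061109567 : Int) (v - m) := by
    have h : v - (m - 1) - 1 = v - m := by ring
    rw [h]
  rw [hfirst]
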